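-- pv_equiv track=rewrite | github.com/pypi-data/pypi-mirror-399 | packages/gseda/gseda-1.18.0-py3-none-any.whl/gseda/bam_surgery/generate_sbrbam.py | expand_channels
-- ===== SOURCE A (Python) =====
-- from typing import Set, Mapping, List
--
-- def expand_channels(channels: Set[int], expected_num: int) -> Mapping[int, List[int]]:
--     channels = sorted(list(channels))
--     num_ch = len(channels)
--     result = {}
--     for new_ch in range(expected_num):
--         old_ch_idx = new_ch % num_ch
--         old_ch = channels[old_ch_idx]
--         result.setdefault(old_ch, []).append(new_ch)
--     return result
-- ===== SOURCE B (Python) =====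
-- def expand_channels(channels, expected_num):
--     channels = sorted(channels)
--     result = {}
--     if expected_num > 0:
--         quota, rem = divmod(expected_num, len(channels))
--         for i, old_ch in enumerate(channels):
--             cnt = quota + (1 if i < rem else 0)
--             if cnt > 0:
--                 result[old_ch] = [i + k * len(channels) for k in range(cnt)]
--     return result
-- ===== Notes on version B (the rewrite author's own statement) =====
-- stated objective: alternative
-- what changed: Instead of dispatching every new index with modulo through setdefault/append, B computes each sorted channel's share count once via divmod(expected_num, len(channels)) and builds its list directly as the multiples i + k*len(channels).
import Mathlib
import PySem

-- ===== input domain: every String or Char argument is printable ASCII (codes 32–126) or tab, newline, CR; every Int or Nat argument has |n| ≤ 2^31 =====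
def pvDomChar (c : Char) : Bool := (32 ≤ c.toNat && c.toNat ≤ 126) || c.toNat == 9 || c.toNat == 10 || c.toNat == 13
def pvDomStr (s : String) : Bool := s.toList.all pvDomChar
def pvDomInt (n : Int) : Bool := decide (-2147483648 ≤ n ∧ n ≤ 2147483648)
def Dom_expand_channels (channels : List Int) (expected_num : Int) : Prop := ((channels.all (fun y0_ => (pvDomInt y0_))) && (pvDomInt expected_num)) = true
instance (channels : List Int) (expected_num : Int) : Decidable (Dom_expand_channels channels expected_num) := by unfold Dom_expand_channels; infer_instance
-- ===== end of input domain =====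

-- B replaces A's per-index modulo dispatch (setdefault/append) by computing each sorted channel's
-- share count once via divmod and emitting its whole list of multiples i + k*len(channels) directly.


-- ===== PORT A =====
def expand_channels (channels : List Int) (expected_num : Int) : List (Int × List Int) :=
  let cs := PySem.List.sorted channels (fun x => x) false
  let num_ch := PySem.List.len cs
  let result := (PySem.List.pyRange 0 expected_num 1).foldl
    (fun d new_ch =>
      d.modify (PySem.List.pyGetD cs (PySem.Int.mod new_ch num_ch) 0) [] (fun v => v ++ [new_ch]))
    PySem.Dict.empty
  result.items

-- ===== PORT B =====
def expand_channels_alt (channels : List Int) (expected_num : Int) : List (Int × List Int) :=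
  let cs := PySem.List.sorted channels (fun x => x) false
  let result :=
    if expected_num > 0 then
      -- divmod? is none exactly where Python's divmod raises ZeroDivisionError (outside Pre_)
      match PySem.Int.divmod? expected_num (PySem.List.len cs) with
      | none => PySem.Dict.empty
      | some (quota, rem) =>
        (PySem.List.enumerate cs 0).foldl
          (fun d p =>
            let cnt := quota + (if p.1 < rem then 1 else 0)
            if 0 < cnt then
              d.insert p.2 ((PySem.List.pyRange 0 cnt 1).map (fun k => p.1 + k * PySem.List.len cs))
            else d)
          PySem.Dict.empty
    else PySem.Dict.empty
  result.items

-- ===== PRECONDITION & SPEC =====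
-- Pre_ excludes empty channels with expected_num > 0, where both A and B raise ZeroDivisionError.
-- The Nodup conjunct only mirrors the parameter's declared type Set[int]: a Lean list with duplicate
-- elements does not represent any Python set input.
def Pre_expand_channels (channels : List Int) (expected_num : Int) : Prop :=
  channels.Nodup ∧ (channels = [] → expected_num ≤ 0)
instance (channels : List Int) (expected_num : Int) : Decidable (Pre_expand_channels channels expected_num) := by unfold Pre_expand_channels; infer_instance
def pvWitness_expand_channels : List Int × Int := ([3, 1, 2], 7)

def Spec_expand_channels (channels : List Int) (expected_num : Int) (out : List (Int × List Int)) : Prop := out = expand_channels_alt channels expected_num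
instance (channels : List Int) (expected_num : Int) (out : List (Int × List Int)) : Decidable (Spec_expand_channels channels expected_num out) := by unfold Spec_expand_channels; infer_instance

-- ===== CLAIM (what is proved, stated in full; the proofs are below) =====
def Claim_equal_expand_channels : Prop := ∀ (channels : List Int) (expected_num : Int), Dom_expand_channels channels expected_num → Pre_expand_channels channels expected_num → Spec_expand_channels channels expected_num (expand_channels channels expected_num)

-- ===== LEMMAS AND PROOFS =====

-- the stride range(i, E, n) (0 < n, i < n) is exactly the indices below E congruent to i mod n
lemma stride_eq_filter_range (n i : Nat) (hn : 0 < n) (hi : i < n) (E : Nat) :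
    PySem.List.pyRange (i : Int) (E : Int) (n : Int) =
      List.map (fun (m : Nat) => (m : Int)) ((List.range E).filter (fun m => m % n == i)) := by
  have hs : (0:Int) < (n:Int) := by exact_mod_cast hn
  have hinj : Function.Injective (fun (k : Nat) => (i : Int) + (n : Int) * (k : Nat)) := by
    intro a b h
    simp only at h
    have h2 : (n:Int) * a = (n:Int) * b := by linarith
    have h3 := mul_left_cancel₀ (ne_of_gt hs) h2
    exact_mod_cast h3
  have hnodL : (PySem.List.pyRange (i : Int) (E : Int) (n : Int)).Nodup := by
    rw [PySem.List.pyRange_of_pos _ _ hs]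
    exact List.nodup_range.map hinj
  have hpwL : (PySem.List.pyRange (i : Int) (E : Int) (n : Int)).Pairwise (· < ·) := by
    rw [PySem.List.pyRange_of_pos _ _ hs]
    exact List.pairwise_lt_range.map _ (fun a b h => by
      have h' : (a:Int) < b := by exact_mod_cast h
      nlinarith)
  have hnodR : (List.map (fun (m : Nat) => (m : Int)) ((List.range E).filter (fun m => m % n == i))).Nodup := by
    apply List.Nodup.map (fun a b h => by exact_mod_cast h)
    exact (List.nodup_range).filter _
  have hpwR : (List.map (fun (m : Nat) => (m : Int)) ((List.range E).filter (fun m => m % n == i))).Pairwise (· < ·) := by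
    apply List.Pairwise.map _ (fun a b (h : a < b) => ?_)
    · exact List.Pairwise.sublist List.filter_sublist List.pairwise_lt_range
    · exact_mod_cast h
  refine List.Perm.eq_of_pairwise (fun a b _ _ h1 h2 => absurd h1 (lt_asymm h2)) hpwL hpwR ?_
  rw [List.perm_ext_iff_of_nodup hnodL hnodR]
  intro x
  rw [PySem.List.mem_pyRange_iff_of_pos hs x]
  simp only [List.mem_map, List.mem_filter, List.mem_range, beq_iff_eq]
  constructor
  · rintro ⟨h1, h2, k, hk⟩
    have hx0 : (0:Int) ≤ x := le_trans (by positivity) h1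
    have hk0 : (0:Int) ≤ k := by nlinarith
    have hkc : ((k.toNat : Int)) = k := Int.toNat_of_nonneg hk0
    refine ⟨i + n * k.toNat, ⟨⟨?_, ?_⟩, ?_⟩⟩
    · have h5 : ((i + n * k.toNat : Nat) : Int) < (E : Int) := by push_cast [hkc]; linarith
      exact_mod_cast h5
    · rw [Nat.add_mul_mod_self_left, Nat.mod_eq_of_lt hi]
    · push_cast [hkc]; linarith
  · rintro ⟨m, ⟨hm, hmod⟩, rfl⟩
    have hdm := Nat.div_add_mod m n
    rw [hmod] at hdm
    have hcast : (n:Int) * (m / n : Nat) + (i:Int) = (m:Int) := by exact_mod_cast hdm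
    refine ⟨by nlinarith [Int.natCast_nonneg (m / n)], by exact_mod_cast hm, ⟨(m / n : Nat), by linarith⟩⟩

-- the indices of range n below E
lemma filter_range_lt (n E : Nat) :
    (List.range n).filter (fun i => decide (i < E)) = List.range (min n E) := by
  induction n with
  | zero => simp
  | succ n ih =>
    rw [List.range_succ, List.filter_append, ih]
    by_cases h : n < E
    · rw [Nat.min_eq_left (by omega), Nat.min_eq_left (by omega), List.range_succ]
      simp [h]
    · rw [Nat.min_eq_right (by omega), Nat.min_eq_right (by omega)]
      simp [h]

-- first occurrences of cs[m % n] over m < E form the prefix of cs of length min n E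
lemma ofList_mod_map (cs : List Int) (hnd : cs.Nodup) (hn : 0 < cs.length) (E : Nat) :
    PySem.Set.ofList ((List.range E).map (fun m => cs.getD (m % cs.length) 0)) =
      (List.range (min cs.length E)).map (fun i => cs.getD i 0) := by
  induction E with
  | zero => simp [PySem.Set.ofList_nil]
  | succ E ih =>
    rw [List.range_succ, List.map_append, List.map_singleton, PySem.Set.ofList_append_singleton, ih]
    by_cases h : E < cs.length
    · rw [Nat.mod_eq_of_lt h]
      rw [PySem.Set.add_of_not_mem ?_]
      · rw [Nat.min_eq_right (by omega), Nat.min_eq_right (by omega), List.range_succ, List.map_append]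
        simp
      · intro hmem
        obtain ⟨i, hi, hgd⟩ := List.mem_map.mp hmem
        rw [List.mem_range] at hi
        have hi' : i < cs.length := by omega
        rw [List.getD_eq_getElem cs 0 hi', List.getD_eq_getElem cs 0 h] at hgd
        have := (List.Nodup.getElem_inj_iff hnd).mp hgd
        omega
    · rw [PySem.Set.add_of_mem ?_]
      · rw [Nat.min_eq_left (by omega), Nat.min_eq_left (by omega)]
      · apply List.mem_map.mpr
        exact ⟨E % cs.length, List.mem_range.mpr (by rw [Nat.min_eq_left (by omega)]; exact Nat.mod_lt _ hn), rfl⟩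

-- B's divmod-derived count for channel i is the length of A's stride, and its multiples are the stride
lemma cnt_eq_ceil (E n i : Int) (hn : 0 < n) (hi0 : 0 ≤ i) (hin : i < n) :
    E.fdiv n + (if i < E.fmod n then 1 else 0) = (E - i + n - 1) / n := by
  have hd : E.fdiv n = E / n := Int.fdiv_eq_ediv_of_nonneg E (le_of_lt hn)
  have hm : E.fmod n = E % n := Int.fmod_eq_emod_of_nonneg E (le_of_lt hn)
  have hqr := Int.mul_ediv_add_emod E n
  have hr0 := Int.emod_nonneg E (ne_of_gt hn)
  have hrn := Int.emod_lt_of_pos E hn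
  set q := E / n with hq
  set r := E % n with hrdef
  have hsplit : E - i + n - 1 = (r - i + n - 1) + q * n := by linarith
  rw [hd, hm, hsplit, Int.add_mul_ediv_right _ _ (ne_of_gt hn)]
  by_cases h : i < r
  · rw [if_pos h]
    have ht : (r - i + n - 1) = (r - i - 1) + 1 * n := by ring
    rw [ht, Int.add_mul_ediv_right _ _ (ne_of_gt hn),
        Int.ediv_eq_zero_of_lt (by omega) (by omega)]
    ring
  · rw [if_neg h, Int.ediv_eq_zero_of_lt (by omega) (by omega)]
    ring

lemma cnt_pos_iff (E n i : Int) (hn : 0 < n) (hin : i < n) (hE : 0 < E) :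
    (0 < E.fdiv n + (if i < E.fmod n then 1 else 0)) ↔ i < E := by
  have hd : E.fdiv n = E / n := Int.fdiv_eq_ediv_of_nonneg E (le_of_lt hn)
  have hm : E.fmod n = E % n := Int.fmod_eq_emod_of_nonneg E (le_of_lt hn)
  have hqr := Int.mul_ediv_add_emod E n
  have hr0 := Int.emod_nonneg E (ne_of_gt hn)
  have hrn := Int.emod_lt_of_pos E hn
  have hq0 : 0 ≤ E / n := Int.ediv_nonneg (le_of_lt hE) (le_of_lt hn)
  rw [hd, hm]
  by_cases h : i < E % n
  · rw [if_pos h]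
    constructor
    · intro _; nlinarith
    · intro _; omega
  · rw [if_neg h]
    constructor
    · intro hpos; nlinarith
    · intro hiE
      have hqpos : 0 < E / n := by
        rcases lt_or_ge 0 (E / n) with h1 | h1
        · exact h1
        · have hq00 : E / n = 0 := le_antisymm h1 hq0
          rw [hq00, mul_zero] at hqr
          omega
      omega

lemma cnt_multiples_eq_stride (E n : Int) (i : Nat) (hn : 0 < n) (hin : (i:Int) < n) (hiE : (i:Int) < E) :
    (PySem.List.pyRange 0 (E.fdiv n + (if (i:Int) < E.fmod n then 1 else 0)) 1).map
        (fun k => (i:Int) + k * n)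
      = PySem.List.pyRange (i:Int) E n := by
  rw [cnt_eq_ceil E n i hn (Int.natCast_nonneg i) hin,
      PySem.List.pyRange_of_pos (i:Int) E hn, if_pos hiE, PySem.List.pyRange_one, List.map_map]
  simp only [Int.sub_zero]
  apply List.map_congr_left
  intro k _
  simp [mul_comm]

-- normal form of B's loop (for 0 < E)
lemma B_norm (cs : List Int) (hnd : cs.Nodup) (hn : 0 < cs.length) (E : Nat) (hE : 0 < E) :
    ((PySem.List.enumerate cs 0).foldl
      (fun d p =>
        let cnt := (E:Int).fdiv (PySem.List.len cs) + (if p.1 < (E:Int).fmod (PySem.List.len cs) then 1 else 0)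
        if 0 < cnt then
          d.insert p.2 ((PySem.List.pyRange 0 cnt 1).map (fun k => p.1 + k * PySem.List.len cs))
        else d)
      PySem.Dict.empty).items
    = (List.range (min cs.length E)).map
        (fun i => (cs.getD i 0, PySem.List.pyRange (i : Int) (E : Int) (cs.length : Int))) := by
  have hlen : PySem.List.len cs = (cs.length : Int) := by simp
  have hnI : (0:Int) < (cs.length : Int) := by exact_mod_cast hn
  have hEI : (0:Int) < (E:Int) := by exact_mod_cast hE
  rw [PySem.List.foldl_congr_mem _ _
      (fun d p => if p.1 < (E:Int) then d.insert p.2 (PySem.List.pyRange p.1 (E : Int) (cs.length : Int)) else d) _ ?_]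
  · rw [PySem.List.foldl_ite_eq_foldl_filter (fun p : Int × Int => p.1 < (E:Int))]
    rw [PySem.Dict.items_foldl_insert_fresh _ (fun p : Int × Int => p.2)
        (fun p => PySem.List.pyRange p.1 (E : Int) (cs.length : Int)) _ ?_ ?_]
    · rw [PySem.List.enumerate_eq_map_pyRange cs 0, hlen, PySem.List.pyRange_one]
      simp only [Int.sub_zero, Int.toNat_natCast, List.filter_map, List.map_map]
      have hfc : ((fun x : Int × Int => decide (x.1 < (E:Int))) ∘ (fun j => (j, PySem.List.pyGetD cs j 0)) ∘ fun k : Nat => 0 + (k:Int))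
          = fun (k : Nat) => decide (k < E) := by
        funext k; simp
      rw [hfc, filter_range_lt]
      have hempty : (PySem.Dict.empty : PySem.Dict Int (List Int)).items = [] := rfl
      rw [hempty, List.nil_append]
      apply List.map_congr_left
      intro i _
      simp [PySem.List.pyGetD_natCast]
    · intro a _; exact PySem.Dict.contains_empty _
    · apply List.Nodup.sublist (List.Sublist.map _ List.filter_sublist)
      rw [PySem.List.map_snd_enumerate]
      exact hnd
  · intro d p hp
    obtain ⟨k, hk, rfl⟩ := (PySem.List.mem_enumerate_iff cs 0 p).mp hp
    simp only [hlen, Int.zero_add]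
    have hkn : ((k:Int)) < (cs.length : Int) := by exact_mod_cast hk
    by_cases h : (k:Int) < (E:Int)
    · rw [if_pos ((cnt_pos_iff (E:Int) (cs.length:Int) (k:Int) hnI hkn hEI).mpr h),
          if_pos h, cnt_multiples_eq_stride (E:Int) (cs.length:Int) k hnI hkn h]
    · rw [if_neg (fun hc => h ((cnt_pos_iff (E:Int) (cs.length:Int) (k:Int) hnI hkn hEI).mp hc)),
          if_neg h]

-- normal form of A's loop
lemma A_norm (cs : List Int) (hnd : cs.Nodup) (hn : 0 < cs.length) (E : Nat) :
    ((PySem.List.pyRange 0 (E:Int) 1).foldl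
      (fun d new_ch => d.modify (PySem.List.pyGetD cs (PySem.Int.mod new_ch (PySem.List.len cs)) 0) [] (fun v => v ++ [new_ch]))
      PySem.Dict.empty).items
    = (List.range (min cs.length E)).map
        (fun i => (cs.getD i 0, PySem.List.pyRange (i:Int) (E:Int) (cs.length:Int))) := by
  have h1 : PySem.List.pyRange 0 (E:Int) 1 = (List.range E).map (fun (k : Nat) => (k : Int)) := by
    rw [PySem.List.pyRange_one]
    simp
  rw [h1, List.foldl_map]
  have h2 : (List.range E).foldl
      (fun d (k : Nat) => d.modify (PySem.List.pyGetD cs (PySem.Int.mod (k:Int) (PySem.List.len cs)) 0) [] (fun v => v ++ [(k:Int)]))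
      PySem.Dict.empty
    = (List.range E).foldl
      (fun d (k : Nat) => d.modify (cs.getD (k % cs.length) 0) [] (fun v => v ++ [(k:Int)]))
      PySem.Dict.empty := by
    apply PySem.List.foldl_congr_mem
    intro d k _
    congr 1
    rw [PySem.List.len_eq, PySem.Int.mod_natCast, PySem.List.pyGetD_natCast]
  rw [h2]
  have h3 : ((List.range E).map (fun (k : Nat) => (cs.getD (k % cs.length) 0, (k:Int)))).foldl
      (fun (d : PySem.Dict Int (List Int)) (p : Int × Int) => d.modify p.1 [] (fun v => v ++ [p.2])) PySem.Dict.empty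
    = (List.range E).foldl
      (fun (d : PySem.Dict Int (List Int)) (k : Nat) => d.modify (cs.getD (k % cs.length) 0) [] (fun v => v ++ [(k:Int)]))
      PySem.Dict.empty := List.foldl_map
  rw [← h3]
  set l := (List.range E).map (fun (k : Nat) => (cs.getD (k % cs.length) 0, (k:Int))) with hl
  set d := l.foldl (fun (d : PySem.Dict Int (List Int)) (p : Int × Int) => d.modify p.1 [] (fun v => v ++ [p.2])) PySem.Dict.empty with hd
  have hnodk : d.keys.Nodup := by
    rw [hd]
    exact PySem.Dict.nodup_keys_foldl_modify_key l Prod.fst [] (fun d p v => v ++ [p.2]) _ (by simp [PySem.Dict.keys_empty])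
  have hkeys : d.keys = (List.range (min cs.length E)).map (fun i => cs.getD i 0) := by
    rw [hd, PySem.Dict.keys_foldl_modify_key l Prod.fst [] (fun d p v => v ++ [p.2])]
    rw [PySem.Dict.keys_empty, PySem.Set.update_nil_left, hl, List.map_map]
    exact ofList_mod_map cs hnd hn E
  rw [PySem.Dict.items_eq_map_keys d hnodk [], hkeys, List.map_map]
  apply List.map_congr_left
  intro i hi
  rw [List.mem_range] at hi
  have hi' : i < cs.length := by omega
  simp only [Function.comp]
  congr 1
  rw [hd, PySem.Dict.getD_foldl_modify_append l PySem.Dict.empty (cs.getD i 0)]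
  rw [PySem.Dict.getD_empty, List.nil_append, hl, List.filter_map, List.map_map]
  rw [stride_eq_filter_range cs.length i hn hi' E]
  congr 1
  apply List.filter_congr
  intro k _
  simp only [Function.comp_apply]
  rw [List.getD_eq_getElem cs 0 (Nat.mod_lt k hn), List.getD_eq_getElem cs 0 hi']
  rw [Bool.eq_iff_iff]
  simp [List.Nodup.getElem_inj_iff hnd]

-- ===== VERDICT =====
theorem expand_channels_spec : Claim_equal_expand_channels := by
  intro channels e _ hpre
  obtain ⟨hnd, hemp⟩ := hpre
  simp only [Spec_expand_channels, expand_channels, expand_channels_alt]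
  set cs := PySem.List.sorted channels (fun x => x) false with hcs
  have hperm : cs.Perm channels := PySem.List.sorted_perm channels (fun x => x) false
  have hcnd : cs.Nodup := (hperm.nodup_iff).mpr hnd
  by_cases hnil : cs = []
  · have hch : channels = [] := by
      rw [hnil] at hperm
      exact (hperm.symm).eq_nil
    have he0 : e ≤ 0 := hemp hch
    rw [hnil, PySem.List.pyRange_one_eq_nil he0, List.foldl_nil, if_neg (by omega : ¬ e > 0)]
  · have hn : 0 < cs.length := List.length_pos_iff.mpr hnil
    by_cases he : 0 < e
    · have hnz : PySem.List.len cs ≠ 0 := by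
        rw [PySem.List.len_eq]
        omega
      rw [if_pos he]
      have hdm : PySem.Int.divmod? e (PySem.List.len cs) = some (e.fdiv (PySem.List.len cs), e.fmod (PySem.List.len cs)) := by
        simp [PySem.Int.divmod?, hnil]
      rw [hdm]
      have he' : e = ((e.toNat : Nat) : Int) := (Int.toNat_of_nonneg (by omega)).symm
      rw [he', A_norm cs hcnd hn e.toNat, B_norm cs hcnd hn e.toNat (by omega)]
    · rw [PySem.List.pyRange_one_eq_nil (by omega), List.foldl_nil, if_neg (by omega : ¬ e > 0)]
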